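-- pv_equiv track=rewrite | github.com/chaaaron000/CleanUpHitomiFiles | clean.py | get_author
-- ===== SOURCE A (Python) =====
-- def get_author(folder_name):
--     author = ""
--     flag = False
--     for char in folder_name:
--         if char == '[':
--             flag = True
--         elif char == ']':
--             flag = False
--         if flag:
--             author += char
--     if author:
--         return author[1:]
-- ===== SOURCE B (Python) =====
-- def get_author(folder_name):
--     result = ""
--     for seg in folder_name.split(']'):
--         if '[' in seg:
--             result += seg[seg.index('['):]
--     if result:
--         return result[1:]
-- ===== Notes on version B (the rewrite author's own statement) =====
-- stated objective: faster
-- what changed: B replaces A's per-character flag machine (repeated string concatenation char by char) with a split-and-join decomposition: split the name on the closing bracket, keep each segment's suffix from its first opening bracket, join the pieces, and strip the leading bracket.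
import Mathlib
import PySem

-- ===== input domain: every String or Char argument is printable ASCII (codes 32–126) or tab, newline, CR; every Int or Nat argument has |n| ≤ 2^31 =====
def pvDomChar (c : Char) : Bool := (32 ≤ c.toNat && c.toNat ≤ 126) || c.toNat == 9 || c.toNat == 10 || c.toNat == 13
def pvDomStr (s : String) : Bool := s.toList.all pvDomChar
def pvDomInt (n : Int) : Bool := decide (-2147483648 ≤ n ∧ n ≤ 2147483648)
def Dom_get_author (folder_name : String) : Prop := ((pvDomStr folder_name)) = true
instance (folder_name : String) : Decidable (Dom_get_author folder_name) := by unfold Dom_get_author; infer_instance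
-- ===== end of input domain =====

-- B rewrites A's per-character flag machine as split-on-']' / take-from-'[' / join; equal return value on all inputs.

-- ===== PORT A =====
-- A's for-loop over the characters, carrying the same state (author, flag).
def getAuthorLoop (author : List Char) (flag : Bool) : List Char → List Char
  | [] => author
  | c :: cs =>
    let flag' := if c = '[' then true else if c = ']' then false else flag
    getAuthorLoop (if flag' then author ++ [c] else author) flag' cs

def get_author (folder_name : String) : Option String :=
  let author := getAuthorLoop [] false folder_name.toList
  -- author[1:] on a nonempty string = drop its first character; empty author falls through to None
  if author ≠ [] then some (String.ofList (author.drop 1)) else none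

-- ===== PORT B =====
-- hand port of str.split(']') (single-char separator), exact: "" → [""], keeps empty pieces
def splitRB : List Char → List (List Char)
  | [] => [[]]
  | c :: cs =>
    let r := splitRB cs
    if c = ']' then [] :: r else (c :: r.headD []) :: r.tail

-- B's loop over segments: seg[seg.index('['):] = dropWhile (· ≠ '[') when '[' ∈ seg
def joinSegs (segs : List (List Char)) : List Char :=
  segs.foldl (fun acc seg => if '[' ∈ seg then acc ++ seg.dropWhile (· ≠ '[') else acc) []

def get_author_alt (folder_name : String) : Option String :=
  let result := joinSegs (splitRB folder_name.toList)
  if result ≠ [] then some (String.ofList (result.drop 1)) else none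

-- ===== PRECONDITION & SPEC =====
def Spec_get_author (folder_name : String) (out : Option String) : Prop := out = get_author_alt folder_name
instance (folder_name : String) (out : Option String) : Decidable (Spec_get_author folder_name out) := by unfold Spec_get_author; infer_instance

-- ===== CLAIM (what is proved, stated in full; the proofs are below) =====
def Claim_equal_get_author : Prop := ∀ (folder_name : String), Dom_get_author folder_name → Spec_get_author folder_name (get_author folder_name)

-- ===== LEMMAS AND PROOFS =====

-- non-tail form of A's loop
def fA (flag : Bool) : List Char → List Char
  | [] => []
  | c :: cs =>
    let flag' := if c = '[' then true else if c = ']' then false else flag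
    (if flag' then [c] else []) ++ fA flag' cs

theorem getAuthorLoop_eq_fA (cs : List Char) : ∀ (author : List Char) (flag : Bool),
    getAuthorLoop author flag cs = author ++ fA flag cs := by
  induction cs with
  | nil => intro author flag; simp [getAuthorLoop, fA]
  | cons c cs ih =>
    intro author flag
    simp only [getAuthorLoop, fA, ih]
    split_ifs <;> simp

-- pure (flatMap) form of B's join
def joinAll (segs : List (List Char)) : List Char :=
  (segs.map (fun seg => seg.dropWhile (· ≠ '['))).flatten

theorem joinSegs_acc (segs : List (List Char)) : ∀ acc : List Char,
    segs.foldl (fun acc seg => if '[' ∈ seg then acc ++ seg.dropWhile (· ≠ '[') else acc) acc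
      = acc ++ joinAll segs := by
  induction segs with
  | nil => intro acc; simp [joinAll]
  | cons s ss ih =>
    intro acc
    simp only [List.foldl, ih, joinAll, List.map, List.flatten]
    by_cases h : '[' ∈ s
    · simp [h]
    · simp only [h, ite_false]
      simp
      exact fun x hx he => h (he ▸ hx)

theorem joinSegs_eq (segs : List (List Char)) : joinSegs segs = joinAll segs := by
  rw [joinSegs, joinSegs_acc, List.nil_append]

theorem splitRB_ne_nil (cs : List Char) : splitRB cs ≠ [] := by
  cases cs with
  | nil => simp [splitRB]
  | cons c cs => simp only [splitRB]; split_ifs <;> simp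

-- the core correspondence: A's state machine vs. the split decomposition
theorem fA_eq (cs : List Char) : ∀ flag : Bool,
    fA flag cs =
      (if flag then (splitRB cs).headD [] else ((splitRB cs).headD []).dropWhile (· ≠ '['))
        ++ joinAll (splitRB cs).tail := by
  induction cs with
  | nil => intro flag; simp [fA, splitRB, joinAll]
  | cons c cs ih =>
    intro flag
    by_cases hb : c = ']'
    · -- segment boundary: flag resets; the new head segment is empty
      subst hb
      have hstep : fA flag (']' :: cs) = fA false cs := by simp [fA]
      have hsplit : splitRB (']' :: cs) = [] :: splitRB cs := by simp [splitRB]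
      rw [hstep, ih false, hsplit]
      cases hsp : splitRB cs with
      | nil => exact absurd hsp (splitRB_ne_nil cs)
      | cons s ss => cases flag <;> simp [joinAll]
    · by_cases ho : c = '['
      · -- '[' sets the flag and is kept; it also heads the kept suffix of the segment
        subst ho
        have hstep : fA flag ('[' :: cs) = '[' :: fA true cs := by simp [fA]
        have hsplit : splitRB ('[' :: cs) = ('[' :: (splitRB cs).headD []) :: (splitRB cs).tail := by
          simp [splitRB, hb]
        rw [hstep, ih true, hsplit]
        cases hsp : splitRB cs with
        | nil => exact absurd hsp (splitRB_ne_nil cs)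
        | cons s ss => cases flag <;> simp
      · -- ordinary character: kept iff the flag is on; dropped by dropWhile otherwise
        have hstep : fA flag (c :: cs) = (if flag then [c] else []) ++ fA flag cs := by
          simp [fA, ho, hb]
        have hsplit : splitRB (c :: cs) = (c :: (splitRB cs).headD []) :: (splitRB cs).tail := by
          simp [splitRB, hb]
        rw [hstep, ih flag, hsplit]
        cases hsp : splitRB cs with
        | nil => exact absurd hsp (splitRB_ne_nil cs)
        | cons s ss => cases flag <;> simp [ho]

theorem fA_false_eq_joinAll (cs : List Char) : fA false cs = joinAll (splitRB cs) := by
  rw [fA_eq cs false]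
  cases hsp : splitRB cs with
  | nil => exact absurd hsp (splitRB_ne_nil cs)
  | cons s ss => simp [joinAll]

-- ===== VERDICT (by name: the statement is the Claim_ definition above) =====
theorem get_author_spec : Claim_equal_get_author := by
  intro folder_name _
  unfold Spec_get_author get_author get_author_alt
  rw [getAuthorLoop_eq_fA, List.nil_append, fA_false_eq_joinAll, joinSegs_eq]
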